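-- pv_equiv track=rewrite | github.com/juliuspfadt/journalScrape | scrapeScripts/pdfSageParallel.py | sanitize_doi
-- ===== SOURCE A (Python) =====
-- def sanitize_doi(doi):
--     """
--     Sanitize a DOI for use as a filename by replacing invalid characters with unique replacements.
--     """
--     replacements = {
--         "/": "__",
--         ":": "_COLON_",
--         "?": "_QUESTION_",
--         "<": "_LT_",
--         ">": "_GT_",
--         "|": "_PIPE_",
--         '"': "_QUOTE_",
--         "*": "_STAR_",
--         "\\": "_BACKSLASH_"
--     }
--     for char, replacement in replacements.items():
--         doi = doi.replace(char, replacement)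
--     return doi
-- ===== SOURCE B (Python) =====
-- def sanitize_doi(doi):
--     """
--     Sanitize a DOI for use as a filename by replacing invalid characters with unique replacements.
--     """
--     replacements = {
--         "/": "__",
--         ":": "_COLON_",
--         "?": "_QUESTION_",
--         "<": "_LT_",
--         ">": "_GT_",
--         "|": "_PIPE_",
--         '"': "_QUOTE_",
--         "*": "_STAR_",
--         "\\": "_BACKSLASH_"
--     }
--     return ''.join(replacements.get(c, c) for c in doi)
-- ===== Notes on version B (the rewrite author's own statement) =====
-- stated objective: idiomatic
-- what changed: B makes a single pass over the string, mapping each character through the replacement dict and joining, instead of A's nine sequential full-string replace scans; equivalent because no replacement value contains a key character.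
import Mathlib
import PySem

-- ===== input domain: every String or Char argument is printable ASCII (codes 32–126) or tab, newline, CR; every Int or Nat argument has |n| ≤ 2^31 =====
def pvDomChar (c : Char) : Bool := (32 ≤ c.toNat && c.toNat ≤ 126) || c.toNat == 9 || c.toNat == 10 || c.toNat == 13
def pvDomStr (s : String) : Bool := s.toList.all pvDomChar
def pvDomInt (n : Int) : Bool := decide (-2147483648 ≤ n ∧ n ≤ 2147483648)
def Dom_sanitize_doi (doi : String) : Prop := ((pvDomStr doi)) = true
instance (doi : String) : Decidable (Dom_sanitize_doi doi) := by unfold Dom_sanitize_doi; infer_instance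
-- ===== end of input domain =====

-- B replaces A's nine sequential full-string replace passes by one pass mapping each
-- character through the replacement dict and joining (return value only; no side effects).

-- ===== PORT A =====
-- the dict literal of A, as its (key, value) items in insertion order
def pvRepls : List (String × String) :=
  [("/", "__"), (":", "_COLON_"), ("?", "_QUESTION_"), ("<", "_LT_"), (">", "_GT_"),
   ("|", "_PIPE_"), ("\"", "_QUOTE_"), ("*", "_STAR_"), ("\\", "_BACKSLASH_")]

-- 'for char, replacement in replacements.items(): doi = doi.replace(char, replacement)'
def sanitize_doi (doi : String) : String :=
  pvRepls.foldl (fun s p => PySem.Str.replace s p.1 p.2) doi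

-- ===== PORT B =====
-- B's dict, keyed by the character (Python's one-char strings iterate as characters)
def pvReplDict : PySem.Dict Char String :=
  PySem.Dict.ofList
    [('/', "__"), (':', "_COLON_"), ('?', "_QUESTION_"), ('<', "_LT_"), ('>', "_GT_"),
     ('|', "_PIPE_"), ('"', "_QUOTE_"), ('*', "_STAR_"), ('\\', "_BACKSLASH_")]

-- ''.join(replacements.get(c, c) for c in doi)
def sanitize_doi_alt (doi : String) : String :=
  PySem.Str.join "" (doi.toList.map (fun c => pvReplDict.getD c (String.ofList [c])))

-- ===== PRECONDITION & SPEC =====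
def Spec_sanitize_doi (doi : String) (out : String) : Prop := out = sanitize_doi_alt doi
instance (doi : String) (out : String) : Decidable (Spec_sanitize_doi doi out) := by unfold Spec_sanitize_doi; infer_instance

-- ===== CLAIM (what is proved, stated in full; the proofs are below) =====
def Claim_equal_sanitize_doi : Prop := ∀ (doi : String), Dom_sanitize_doi doi → Spec_sanitize_doi doi (sanitize_doi doi)

-- ===== LEMMAS AND PROOFS =====

-- single-character replace is a flatMap over the characters
lemma pv_go_single (o : Char) (new : List Char) :
    ∀ (fuel : Nat) (l acc : List Char), l.length ≤ fuel →
      PySem.Chars.replace.go [o] new fuel l acc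
        = acc.reverse ++ l.flatMap (fun c => if c = o then new else [c]) := by
  intro fuel
  induction fuel with
  | zero =>
    intro l acc h
    have : l = [] := List.eq_nil_of_length_eq_zero (Nat.le_zero.mp h)
    subst this
    simp [PySem.Chars.replace.go]
  | succ n ih =>
    intro l acc h
    cases l with
    | nil => simp [PySem.Chars.replace.go]
    | cons c t =>
      by_cases hc : c = o
      · subst hc
        have hpre : [c].isPrefixOf (c :: t) = true := by simp [List.isPrefixOf]
        simp only [PySem.Chars.replace.go, hpre, if_true, List.length_cons, List.drop_succ_cons,
          List.length_nil, List.drop_zero]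
        rw [ih t (new.reverse ++ acc) (by simpa using Nat.le_of_succ_le_succ h)]
        simp [List.flatMap_cons]
      · have hpre : [o].isPrefixOf (c :: t) = false := by
          simp [List.isPrefixOf, Ne.symm hc]
        simp only [PySem.Chars.replace.go, hpre]
        rw [ih t (c :: acc) (by simpa using Nat.le_of_succ_le_succ h)]
        simp [List.flatMap_cons, hc]

lemma pv_replace_single (s : List Char) (o : Char) (new : List Char) :
    PySem.Chars.replace s [o] new = s.flatMap (fun c => if c = o then new else [c]) := by
  rw [PySem.Chars.replace]
  simp only [List.isEmpty_cons]
  simpa using pv_go_single o new s.length s [] (le_refl _)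

-- B's per-character function, on the list side
def pvAltF (c : Char) : List Char := (pvReplDict.getD c (String.ofList [c])).toList

-- ''.join on the list side is flatten
lemma pv_join_empty (ps : List (List Char)) : PySem.Chars.join [] ps = ps.flatten := by
  induction ps with
  | nil => simp [PySem.Chars.join_nil]
  | cons p rest ih =>
    cases rest with
    | nil => simp [PySem.Chars.join_singleton]
    | cons q r => rw [PySem.Chars.join_cons_cons]; simp_all

-- the nine-stage pipeline acting on one character equals B's per-character function
lemma pv_chain (c : Char) :
    List.flatMap
      (fun x =>
        List.flatMap
          (fun x =>
            List.flatMap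
              (fun x =>
                List.flatMap
                  (fun x =>
                    List.flatMap
                      (fun x =>
                        List.flatMap
                          (fun x =>
                            List.flatMap
                              (fun x =>
                                List.flatMap (fun c => if c = '\\' then "_BACKSLASH_".toList else [c])
                                  (if x = '*' then "_STAR_".toList else [x]))
                              (if x = '"' then "_QUOTE_".toList else [x]))
                          (if x = '|' then "_PIPE_".toList else [x]))
                      (if x = '>' then "_GT_".toList else [x]))
                  (if x = '<' then "_LT_".toList else [x]))
              (if x = '?' then "_QUESTION_".toList else [x]))
          (if x = ':' then "_COLON_".toList else [x]))
      (if c = '/' then "__".toList else [c]) = pvAltF c := by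
  by_cases h1 : c = '/'; · subst h1; decide
  by_cases h2 : c = ':'; · subst h2; decide
  by_cases h3 : c = '?'; · subst h3; decide
  by_cases h4 : c = '<'; · subst h4; decide
  by_cases h5 : c = '>'; · subst h5; decide
  by_cases h6 : c = '|'; · subst h6; decide
  by_cases h7 : c = '"'; · subst h7; decide
  by_cases h8 : c = '*'; · subst h8; decide
  by_cases h9 : c = '\\'; · subst h9; decide
  have e : pvReplDict = PySem.Dict.mk
      [('/', "__"), (':', "_COLON_"), ('?', "_QUESTION_"), ('<', "_LT_"), ('>', "_GT_"),
       ('|', "_PIPE_"), ('"', "_QUOTE_"), ('*', "_STAR_"), ('\\', "_BACKSLASH_")] := by decide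
  simp only [pvAltF, e, PySem.Dict.getD_eq_get?_getD]
  simp [h1, h2, h3, h4, h5, h6, h7, h8, h9, Ne.symm h1, Ne.symm h2, Ne.symm h3, Ne.symm h4,
    Ne.symm h5, Ne.symm h6, Ne.symm h7, Ne.symm h8, Ne.symm h9, PySem.Dict.get?]

-- ===== VERDICT (by name: the statement is the Claim_ definition above) =====
theorem sanitize_doi_spec : Claim_equal_sanitize_doi := by
  intro doi _
  unfold Spec_sanitize_doi
  rw [← String.toList_inj]
  rw [sanitize_doi, sanitize_doi_alt]
  simp only [pvRepls, List.foldl_cons, List.foldl_nil]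
  rw [PySem.Str.toList_join]
  simp only [PySem.Str.toList_replace,
    show ("/" : String).toList = ['/'] from rfl, show (":" : String).toList = [':'] from rfl,
    show ("?" : String).toList = ['?'] from rfl, show ("<" : String).toList = ['<'] from rfl,
    show (">" : String).toList = ['>'] from rfl, show ("|" : String).toList = ['|'] from rfl,
    show ("\"" : String).toList = ['"'] from rfl, show ("*" : String).toList = ['*'] from rfl,
    show ("\\" : String).toList = ['\\'] from rfl,
    pv_replace_single, List.flatMap_assoc]
  simp only [pv_chain]
  rw [show ("" : String).toList = [] from rfl, pv_join_empty, List.map_map,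
    List.flatMap_def]
  rfl
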